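-- pv_equiv track=rewrite | github.com/runarmod/everybody-codes | stories/1/3/main.py | generate_moduli_and_residues
-- ===== SOURCE A (Python) =====
-- def generate_moduli_and_residues(snails):
--     moduli = []
--     residues = []
--     x, y = 0, 0
--     while len(moduli) < len(snails):
--         if (x, y) in snails:
--             # For this snail, we have to travel y steps, then (x + y + 1) * n extra steps (for some n)
--             moduli.append(x + y + 1)
--             residues.append(y)
--         x += 1
--         y -= 1
--         if y < 0:
--             y = x + y + 1
--             x = 0
--     return moduli, residues
-- ===== SOURCE B (Python) =====
-- def generate_moduli_and_residues(snails):
--     # A snail off the nonnegative grid is never reached by the diagonal walk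
--     # (the original implementation loops forever on such input): fail fast.
--     if any(x < 0 or y < 0 for x, y in snails):
--         raise ValueError("snail off the nonnegative grid")
--     # Sort snails by their visit index along the diagonal enumeration
--     # (diagonal d = x + y comes first, then x ascending within a diagonal).
--     ordered = sorted(snails, key=lambda s: (s[0] + s[1]) * (s[0] + s[1] + 1) // 2 + s[0])
--     return [x + y + 1 for x, y in ordered], [y for _, y in ordered]
-- ===== Notes on version B (the rewrite author's own statement) =====
-- stated objective: faster
-- what changed: B sorts the snails by their diagonal-enumeration index (triangular number of x+y plus x) and maps out moduli/residues, instead of A's cell-by-cell walk over every diagonal; B also raises ValueError on a snail with a negative coordinate, where A's walk loops forever.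
import Mathlib
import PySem

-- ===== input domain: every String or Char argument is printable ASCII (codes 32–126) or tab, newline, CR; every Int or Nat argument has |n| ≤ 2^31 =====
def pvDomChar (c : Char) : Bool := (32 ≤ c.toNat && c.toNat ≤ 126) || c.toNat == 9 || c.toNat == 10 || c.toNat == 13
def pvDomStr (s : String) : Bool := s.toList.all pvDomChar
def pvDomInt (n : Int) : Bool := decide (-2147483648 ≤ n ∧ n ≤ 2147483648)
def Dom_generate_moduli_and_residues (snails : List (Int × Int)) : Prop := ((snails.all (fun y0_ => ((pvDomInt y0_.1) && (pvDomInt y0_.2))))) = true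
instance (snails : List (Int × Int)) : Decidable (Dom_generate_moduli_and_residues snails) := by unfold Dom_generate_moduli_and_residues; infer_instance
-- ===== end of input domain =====

-- B replaces A's cell-by-cell diagonal walk by sorting the snails on their diagonal-enumeration
-- index and mapping out the results (measurably faster; asymptotic change).


-- ===== PORT A =====
-- pvTri d = number of lattice cells on the diagonals 0, …, d-1 (triangular number);
-- pvTri (D+1) is the fuel making A's while-loop total: under Pre_ the loop always
-- exits by its own count check before the fuel runs out (proved below).
def pvTri : Nat → Nat
  | 0 => 0
  | d + 1 => pvTri d + (d + 1)

def loopA (snails : List (Int × Int)) : Nat → Int → Int → List Int → List Int → List Int × List Int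
  | 0, _, _, ms, rs => (ms, rs)
  | fuel + 1, x, y, ms, rs =>
    if ms.length < snails.length then
      let msrs := if (x, y) ∈ snails then (ms ++ [x + y + 1], rs ++ [y]) else (ms, rs)
      let x1 := x + 1
      let y1 := y - 1
      if y1 < 0 then loopA snails fuel 0 (x1 + y1 + 1) msrs.1 msrs.2
      else loopA snails fuel x1 y1 msrs.1 msrs.2
    else (ms, rs)

def generate_moduli_and_residues (snails : List (Int × Int)) : List Int × List Int :=
  let D := snails.foldl (fun acc s => max acc (s.1 + s.2)) 0
  loopA snails (pvTri (D.toNat + 1)) 0 0 [] []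

-- ===== PORT B =====
def pvKeyB (s : Int × Int) : Int :=
  PySem.Int.floordiv ((s.1 + s.2) * (s.1 + s.2 + 1)) 2 + s.1

-- Python B raises ValueError on a snail with a negative coordinate (where A loops
-- forever); those inputs are outside Pre_ and the port returns ([], []) there.
def generate_moduli_and_residues_alt (snails : List (Int × Int)) : List Int × List Int :=
  if snails.any (fun s => s.1 < 0 || s.2 < 0) then ([], [])
  else
    let ordered := PySem.List.sorted snails pvKeyB
    (ordered.map (fun s => s.1 + s.2 + 1), ordered.map (fun s => s.2))

-- ===== PRECONDITION & SPEC =====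
-- Pre_ excludes exactly the inputs on which A never returns (its while-loop diverges):
-- with a duplicated snail or a snail having a negative coordinate, A's walk over the
-- nonnegative lattice can never make len(moduli) reach len(snails).
def Pre_generate_moduli_and_residues (snails : List (Int × Int)) : Prop :=
  snails.Nodup ∧ ∀ p ∈ snails, 0 ≤ p.1 ∧ 0 ≤ p.2
instance (snails : List (Int × Int)) : Decidable (Pre_generate_moduli_and_residues snails) := by
  unfold Pre_generate_moduli_and_residues; infer_instance

def pvWitness_generate_moduli_and_residues : (List (Int × Int)) := [(0, 0), (2, 5), (7, 1), (3, 3), (10, 0), (0, 4)]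

def Spec_generate_moduli_and_residues (snails : List (Int × Int)) (out : List Int × List Int) : Prop := out = generate_moduli_and_residues_alt snails
instance (snails : List (Int × Int)) (out : List Int × List Int) : Decidable (Spec_generate_moduli_and_residues snails out) := by unfold Spec_generate_moduli_and_residues; infer_instance

-- ===== CLAIM (what is proved, stated in full; the proofs are below) =====
def Claim_equal_generate_moduli_and_residues : Prop := ∀ (snails : List (Int × Int)), Dom_generate_moduli_and_residues snails → Pre_generate_moduli_and_residues snails → Spec_generate_moduli_and_residues snails (generate_moduli_and_residues snails)

-- ===== LEMMAS AND PROOFS =====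

-- the successor state of A's walk
def pvStep (s : Int × Int) : Int × Int :=
  if s.2 - 1 < 0 then (0, s.1 + s.2 + 1) else (s.1 + 1, s.2 - 1)

-- the list of the first n states of the walk starting at s
def pvVisits : Nat → (Int × Int) → List (Int × Int)
  | 0, _ => []
  | n + 1, s => s :: pvVisits n (pvStep s)

def pvValid (s : Int × Int) : Prop := 0 ≤ s.1 ∧ 0 ≤ s.2

-- the enumeration index of a valid state
def pvRank (s : Int × Int) : Nat := pvTri (s.1 + s.2).toNat + s.1.toNat

lemma pvValid_step {s : Int × Int} (h : pvValid s) : pvValid (pvStep s) := by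
  obtain ⟨h1, h2⟩ := h
  unfold pvStep pvValid
  split <;> constructor <;> simp_all <;> omega

lemma pvRank_step {s : Int × Int} (h : pvValid s) : pvRank (pvStep s) = pvRank s + 1 := by
  obtain ⟨h1, h2⟩ := h
  unfold pvStep pvRank
  split
  · simp only []
    have h0 : (0 + (s.1 + s.2 + 1)).toNat = (s.1 + s.2).toNat + 1 := by omega
    rw [h0, pvTri]
    omega
  · have h0 : (s.1 + 1 + (s.2 - 1)).toNat = (s.1 + s.2).toNat := by omega
    rw [h0]
    omega

lemma pvValid_iter (n : Nat) : pvValid (pvStep^[n] (0, 0)) := by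
  induction n with
  | zero => exact ⟨le_refl 0, le_refl 0⟩
  | succ k ih => rw [Function.iterate_succ_apply']; exact pvValid_step ih

lemma pvRank_iter (n : Nat) : pvRank (pvStep^[n] (0, 0)) = n := by
  induction n with
  | zero => rfl
  | succ k ih => rw [Function.iterate_succ_apply', pvRank_step (pvValid_iter k), ih]

lemma pvTri_pos_of_pos {d : Nat} (h : 0 < d) : 0 < pvTri d := by
  cases d with
  | zero => omega
  | succ k => simp [pvTri]

-- every valid state is reached at step pvRank p
lemma pvIter_rank (p : Int × Int) (h : pvValid p) : pvStep^[pvRank p] (0, 0) = p := by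
  obtain ⟨h1, h2⟩ := h
  generalize hn : pvRank p = n
  induction n generalizing p with
  | zero =>
    unfold pvRank at hn
    have hx : p.1 = 0 := by omega
    have hd : (p.1 + p.2).toNat = 0 := by
      by_contra hc
      have := pvTri_pos_of_pos (d := (p.1 + p.2).toNat) (by omega)
      omega
    have hy : p.2 = 0 := by omega
    obtain ⟨a, b⟩ := p
    simp_all
  | succ k ih =>
    by_cases hx : 0 < p.1
    · have hstep : pvStep (p.1 - 1, p.2 + 1) = p := by
        unfold pvStep; simp only
        rw [if_neg (by omega : ¬ (p.2 + 1 - 1 < 0))]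
        exact (Prod.ext_iff.mpr ⟨by omega, by omega⟩)
      have hrank : pvRank (p.1 - 1, p.2 + 1) = k := by
        have := pvRank_step (s := (p.1 - 1, p.2 + 1)) ⟨by omega, by omega⟩
        rw [hstep, hn] at this
        omega
      have := ih (p.1 - 1, p.2 + 1) (by omega) (by omega) hrank
      rw [Function.iterate_succ_apply', this, hstep]
    · have hx0 : p.1 = 0 := by omega
      have hdpos : 0 < p.2 := by
        by_contra hc
        have hy0 : p.2 = 0 := by omega
        unfold pvRank at hn
        rw [hx0, hy0] at hn
        simp [pvTri] at hn
      have hstep : pvStep (p.2 - 1, 0) = p := by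
        unfold pvStep; simp only
        rw [if_pos (by omega : (0:Int) - 1 < 0)]
        exact (Prod.ext_iff.mpr ⟨by omega, by omega⟩)
      have hrank : pvRank (p.2 - 1, 0) = k := by
        have := pvRank_step (s := (p.2 - 1, 0)) ⟨by omega, le_refl 0⟩
        rw [hstep, hn] at this
        omega
      have := ih (p.2 - 1, 0) (by omega) (by omega) hrank
      rw [Function.iterate_succ_apply', this, hstep]

lemma pvVisits_length (n : Nat) (s : Int × Int) : (pvVisits n s).length = n := by
  induction n generalizing s with
  | zero => rfl
  | succ k ih => simp [pvVisits, ih]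

lemma pvVisits_getElem (n : Nat) (s : Int × Int) (i : Nat) (hi : i < (pvVisits n s).length) :
    (pvVisits n s)[i] = pvStep^[i] s := by
  induction n generalizing s i with
  | zero => simp [pvVisits_length] at hi
  | succ k ih =>
    cases i with
    | zero => rfl
    | succ j =>
      have hj : j < (pvVisits k (pvStep s)).length := by
        rw [pvVisits_length] at hi ⊢; omega
      show (pvVisits k (pvStep s))[j] = _
      rw [ih (pvStep s) j hj, Function.iterate_succ_apply]

lemma pvMem_visits_zero {p : Int × Int} {n : Nat} (hp : pvValid p) (hr : pvRank p < n) :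
    p ∈ pvVisits n (0, 0) := by
  have hlen : pvRank p < (pvVisits n (0, 0)).length := by rw [pvVisits_length]; exact hr
  have h := pvVisits_getElem n (0, 0) (pvRank p) hlen
  rw [pvIter_rank p hp] at h
  exact h ▸ List.getElem_mem hlen

lemma pvVisits_valid {p : Int × Int} {n : Nat} (hp : p ∈ pvVisits n (0, 0)) : pvValid p := by
  obtain ⟨i, hi, hget⟩ := List.mem_iff_getElem.mp hp
  rw [pvVisits_getElem n (0, 0) i hi] at hget
  exact hget ▸ pvValid_iter i

lemma pvVisits_pairwise_rank (n : Nat) :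
    (pvVisits n (0, 0)).Pairwise (fun a b => pvRank a < pvRank b) := by
  rw [List.pairwise_iff_getElem]
  intro i j hi hj hij
  rw [pvVisits_getElem n (0, 0) i hi, pvVisits_getElem n (0, 0) j hj,
    pvRank_iter, pvRank_iter]
  exact hij

lemma pvTwo_tri (d : Nat) : 2 * pvTri d = d * (d + 1) := by
  induction d with
  | zero => rfl
  | succ k ih => simp only [pvTri, Nat.mul_add]; nlinarith [ih]

-- on valid states the Python sort key is the enumeration index
lemma pvKeyB_eq_rank {p : Int × Int} (h : pvValid p) : pvKeyB p = (pvRank p : Int) := by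
  obtain ⟨h1, h2⟩ := h
  unfold pvKeyB pvRank
  rw [PySem.Int.floordiv_eq_ediv_of_pos (by norm_num : (0:Int) < 2)]
  have hgen : ∀ n : Nat, ((n : Int) * ((n : Int) + 1)) = 2 * (pvTri n : Int) := by
    intro n
    have h := pvTwo_tri n
    have h2 : ((2 * pvTri n : Nat) : Int) = ((n * (n + 1) : Nat) : Int) := by exact_mod_cast congrArg Nat.cast h
    push_cast at h2
    linarith
  have hd : (p.1 + p.2) = ((p.1 + p.2).toNat : Int) := by omega
  rw [hd]
  simp only [Int.toNat_natCast]
  rw [hgen, Int.mul_ediv_cancel_left _ (by norm_num)]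
  push_cast
  omega

lemma pvTri_mono {a b : Nat} (h : a ≤ b) : pvTri a ≤ pvTri b := by
  induction b with
  | zero =>
    have : a = 0 := by omega
    rw [this]
  | succ k ih =>
    rcases Nat.lt_or_ge a (k + 1) with hlt | hge
    · have h1 := ih (by omega)
      simp only [pvTri]
      omega
    · have : a = k + 1 := by omega
      rw [this]

-- the rank of a snail fits below the fuel bound
lemma pvRank_lt_fuel {p : Int × Int} {D : Int} (hv : pvValid p) (hD : p.1 + p.2 ≤ D) :
    pvRank p < pvTri (D.toNat + 1) := by
  obtain ⟨h1, h2⟩ := hv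
  unfold pvRank
  have hle := pvTri_mono (show (p.1 + p.2).toNat + 1 ≤ D.toNat + 1 by omega)
  have hx : p.1.toNat ≤ (p.1 + p.2).toNat := by omega
  have hstep : pvTri ((p.1 + p.2).toNat + 1) = pvTri (p.1 + p.2).toNat + ((p.1 + p.2).toNat + 1) := rfl
  omega

-- the loop, characterised: it appends exactly the visited snails, in visit order
lemma pvLoopA_filter (snails : List (Int × Int)) (fuel : Nat) :
    ∀ (s : Int × Int) (ms rs : List Int),
      ms.length ≤ snails.length →
      (pvVisits fuel s).countP (fun p => decide (p ∈ snails)) = snails.length - ms.length →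
      loopA snails fuel s.1 s.2 ms rs =
        (ms ++ ((pvVisits fuel s).filter (fun p => decide (p ∈ snails))).map (fun p => p.1 + p.2 + 1),
         rs ++ ((pvVisits fuel s).filter (fun p => decide (p ∈ snails))).map (fun p => p.2)) := by
  induction fuel with
  | zero => intro s ms rs _ _; simp [loopA, pvVisits]
  | succ k ih =>
    intro s ms rs hle hcnt
    rw [loopA]
    have hvis : pvVisits (k + 1) s = s :: pvVisits k (pvStep s) := rfl
    by_cases hlt : ms.length < snails.length
    · rw [if_pos hlt]
      simp only [Prod.mk.eta]
      rw [hvis, List.countP_cons] at hcnt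
      by_cases hmem : s ∈ snails
      · rw [if_pos hmem]
        simp only [hmem, decide_true, if_pos] at hcnt
        have hle' : (ms ++ [s.1 + s.2 + 1]).length ≤ snails.length := by
          simp; omega
        have hcnt' : (pvVisits k (pvStep s)).countP (fun p => decide (p ∈ snails)) =
            snails.length - (ms ++ [s.1 + s.2 + 1]).length := by
          simp only [List.length_append, List.length_cons, List.length_nil]
          omega
        have hrec := ih (pvStep s) (ms ++ [s.1 + s.2 + 1]) (rs ++ [s.2]) hle' hcnt'
        have hgoal : loopA snails k (pvStep s).1 (pvStep s).2 (ms ++ [s.1 + s.2 + 1]) (rs ++ [s.2]) =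
            (ms ++ ((pvVisits (k + 1) s).filter (fun p => decide (p ∈ snails))).map (fun p => p.1 + p.2 + 1),
             rs ++ ((pvVisits (k + 1) s).filter (fun p => decide (p ∈ snails))).map (fun p => p.2)) := by
          rw [hrec, hvis]
          simp [hmem]
        by_cases hy : s.2 - 1 < 0
        · rw [if_pos hy]
          have harg1 : (0 : Int) = (pvStep s).1 := by unfold pvStep; rw [if_pos hy]
          have harg2 : s.1 + 1 + (s.2 - 1) + 1 = (pvStep s).2 := by
            unfold pvStep; rw [if_pos hy]; simp only; ring
          rw [harg1, harg2, hgoal]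
        · rw [if_neg hy]
          have harg1 : s.1 + 1 = (pvStep s).1 := by unfold pvStep; rw [if_neg hy]
          have harg2 : s.2 - 1 = (pvStep s).2 := by unfold pvStep; rw [if_neg hy]
          rw [harg1, harg2, hgoal]
      · rw [if_neg hmem]
        simp [hmem] at hcnt
        have hcnt' : (pvVisits k (pvStep s)).countP (fun p => decide (p ∈ snails)) =
            snails.length - ms.length := by omega
        have hrec := ih (pvStep s) ms rs hle hcnt'
        have hgoal : loopA snails k (pvStep s).1 (pvStep s).2 ms rs =
            (ms ++ ((pvVisits (k + 1) s).filter (fun p => decide (p ∈ snails))).map (fun p => p.1 + p.2 + 1),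
             rs ++ ((pvVisits (k + 1) s).filter (fun p => decide (p ∈ snails))).map (fun p => p.2)) := by
          rw [hrec, hvis]
          simp [hmem]
        by_cases hy : s.2 - 1 < 0
        · rw [if_pos hy]
          have harg1 : (0 : Int) = (pvStep s).1 := by unfold pvStep; rw [if_pos hy]
          have harg2 : s.1 + 1 + (s.2 - 1) + 1 = (pvStep s).2 := by
            unfold pvStep; rw [if_pos hy]; simp only; ring
          rw [harg1, harg2, hgoal]
        · rw [if_neg hy]
          have harg1 : s.1 + 1 = (pvStep s).1 := by unfold pvStep; rw [if_neg hy]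
          have harg2 : s.2 - 1 = (pvStep s).2 := by unfold pvStep; rw [if_neg hy]
          rw [harg1, harg2, hgoal]
    · rw [if_neg hlt]
      have hms : ms.length = snails.length := by omega
      have hc0 : (pvVisits (k + 1) s).countP (fun p => decide (p ∈ snails)) = 0 := by omega
      have hfil : (pvVisits (k + 1) s).filter (fun p => decide (p ∈ snails)) = [] := by
        rw [List.filter_eq_nil_iff]
        exact fun a ha => by
          have := List.countP_eq_zero.mp hc0 a ha
          simpa using this
      simp [hfil]

-- ===== VERDICT (by name: the statement is the Claim_ definition above) =====
theorem generate_moduli_and_residues_spec : Claim_equal_generate_moduli_and_residues := by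
  intro snails _ hpre
  obtain ⟨hnd, hpos⟩ := hpre
  unfold Spec_generate_moduli_and_residues
  unfold generate_moduli_and_residues generate_moduli_and_residues_alt
  rw [if_neg (by
    simp only [List.any_eq_true, Bool.or_eq_true, decide_eq_true_eq, not_exists]
    intro p
    rw [not_and]
    intro hp
    have := hpos p hp
    omega)]
  simp only []
  set D := snails.foldl (fun acc s => max acc (s.1 + s.2)) 0 with hD
  set N := pvTri (D.toNat + 1) with hN
  set F := (pvVisits N (0, 0)).filter (fun p => decide (p ∈ snails)) with hF
  have hvalid : ∀ p ∈ snails, pvValid p := fun p hp => hpos p hp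
  have hmemF : ∀ a, a ∈ F ↔ a ∈ snails := by
    intro a
    constructor
    · intro ha
      have := List.of_mem_filter ha
      simpa using this
    · intro ha
      refine List.mem_filter.mpr ⟨?_, by simpa using ha⟩
      refine pvMem_visits_zero (hvalid a ha) ?_
      exact pvRank_lt_fuel (hvalid a ha)
        ((PySem.List.le_foldl_max_int snails (fun s => s.1 + s.2) 0).2 a ha)
  have hnodupF : F.Nodup := by
    refine List.Nodup.filter _ ?_
    have hpw := pvVisits_pairwise_rank N
    exact hpw.imp (fun h => by intro he; rw [he] at h; omega)
  have hperm : F.Perm snails := (List.perm_ext_iff_of_nodup hnodupF hnd).mpr hmemF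
  have hpair : F.Pairwise (fun a b => pvKeyB a < pvKeyB b) := by
    have hpw := (pvVisits_pairwise_rank N).filter (fun p => decide (p ∈ snails))
    refine hpw.imp_of_mem ?_
    intro a b ha hb hr
    have hva : pvValid a := pvVisits_valid (List.mem_of_mem_filter ha)
    have hvb : pvValid b := pvVisits_valid (List.mem_of_mem_filter hb)
    rw [pvKeyB_eq_rank hva, pvKeyB_eq_rank hvb]
    exact_mod_cast hr
  have hsorted : PySem.List.sorted snails pvKeyB = F :=
    PySem.List.sorted_eq_of_perm_of_pairwise_lt snails F pvKeyB hperm hpair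
  have hcount : (pvVisits N (0, 0)).countP (fun p => decide (p ∈ snails)) =
      snails.length - ([] : List Int).length := by
    rw [List.countP_eq_length_filter, ← hF, hperm.length_eq]
    simp
  have hmain := pvLoopA_filter snails N (0, 0) [] [] (by simp) hcount
  simp only [] at hmain
  rw [hmain, hsorted, hF]
  simp
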